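-- pv_equiv track=rewrite | github.com/Das-Panda/Harvard_CS50 | Problem Set 2/Vanity Plates/Plates.py | check_characters_and_position
-- ===== SOURCE A (Python) =====
-- def check_characters_and_position(s):
--     # Flags to check if we are in the numeric part of the plate
--     seen_number = False
--
--     for i, c in enumerate(s):
--         if c.isdigit():
--             if c == '0' and not seen_number:
--                 return False  # First number cannot be '0'
--             seen_number = True
--         elif not c.isalpha():
--             return False  # No periods, spaces, or punctuation marks allowed
--         elif seen_number:
--             return False  # No letters allowed after numbers start
--
--     return True
-- ===== SOURCE B (Python) =====
-- def check_characters_and_position(s):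
--     idx = next((i for i, c in enumerate(s) if c.isdigit()), len(s))
--     letters, numbers = s[:idx], s[idx:]
--     if not all(c.isalpha() for c in letters):
--         return False
--     if numbers and numbers[0] == '0':
--         return False
--     return all(c.isdigit() for c in numbers)
-- ===== Notes on version B (the rewrite author's own statement) =====
-- stated objective: simpler
-- what changed: Replaced the single stateful pass with a seen_number flag by locating the first digit, slicing the string into a letter prefix and a numeric suffix, and validating each segment independently.
import Mathlib
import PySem

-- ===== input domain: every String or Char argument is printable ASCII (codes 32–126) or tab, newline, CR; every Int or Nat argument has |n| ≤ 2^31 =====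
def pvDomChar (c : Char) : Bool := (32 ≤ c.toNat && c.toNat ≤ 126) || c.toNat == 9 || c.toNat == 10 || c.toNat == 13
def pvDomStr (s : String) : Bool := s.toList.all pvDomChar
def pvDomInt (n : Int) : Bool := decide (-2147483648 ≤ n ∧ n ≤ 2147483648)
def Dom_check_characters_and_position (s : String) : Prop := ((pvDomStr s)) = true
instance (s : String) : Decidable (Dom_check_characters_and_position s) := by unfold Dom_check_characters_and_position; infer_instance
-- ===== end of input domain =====

-- B replaces A's single stateful pass (seen_number flag) by a split at the first digit
-- and two independent segment validations; objective: simpler decomposition.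


-- ===== PORT A =====
def goA : List Char → Bool → Bool
  | [], _ => true
  | c :: rest, seen =>
    if PySem.Chars.isdigit c then
      if c == '0' && !seen then false else goA rest true
    else if !PySem.Chars.isalpha c then false
    else if seen then false
    else goA rest seen

def check_characters_and_position (s : String) : Bool := goA s.toList false

-- ===== PORT B =====
def check_characters_and_position_alt (s : String) : Bool :=
  let cs := s.toList
  let letters := cs.takeWhile (fun c => !PySem.Chars.isdigit c)
  let numbers := cs.dropWhile (fun c => !PySem.Chars.isdigit c)
  if !letters.all (fun c => PySem.Chars.isalpha c) then false
  else if (match numbers with | c :: _ => c == '0' | [] => false) then false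
  else numbers.all (fun c => PySem.Chars.isdigit c)

-- ===== PRECONDITION & SPEC =====
def Spec_check_characters_and_position (s : String) (out : Bool) : Prop := out = check_characters_and_position_alt s
instance (s : String) (out : Bool) : Decidable (Spec_check_characters_and_position s out) := by unfold Spec_check_characters_and_position; infer_instance

-- ===== CLAIM (what is proved, stated in full; the proofs are below) =====
def Claim_equal_check_characters_and_position : Prop := ∀ (s : String), Dom_check_characters_and_position s → Spec_check_characters_and_position s (check_characters_and_position s)

-- ===== LEMMAS AND PROOFS =====

-- once in the numeric part, A just checks that every remaining char is a digit
theorem goA_true (cs : List Char) : goA cs true = cs.all (fun c => PySem.Chars.isdigit c) := by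
  induction cs with
  | nil => rfl
  | cons c rest ih =>
    simp only [goA, List.all_cons]
    by_cases h : PySem.Chars.isdigit c = true
    · simp [h, ih]
    · simp only [h, Bool.false_and]
      simp

theorem goA_eq_split (cs : List Char) :
    goA cs false =
      (if !(cs.takeWhile (fun c => !PySem.Chars.isdigit c)).all (fun c => PySem.Chars.isalpha c) then false
       else if (match cs.dropWhile (fun c => !PySem.Chars.isdigit c) with | c :: _ => c == '0' | [] => false) then false
       else (cs.dropWhile (fun c => !PySem.Chars.isdigit c)).all (fun c => PySem.Chars.isdigit c)) := by
  induction cs with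
  | nil => rfl
  | cons c rest ih =>
    by_cases h : PySem.Chars.isdigit c = true
    · have ht : (fun c => !PySem.Chars.isdigit c) c = false := by simp [h]
      rw [List.takeWhile_cons_of_neg (by simp [ht]), List.dropWhile_cons_of_neg (by simp [ht])]
      simp only [goA, h, if_true, List.all_nil, Bool.not_true, Bool.not_false]
      by_cases h0 : c = '0'
      · simp [h0]
      · have : (c == '0') = false := by simp [h0]
        simp [this, goA_true, h]
    · have hb : PySem.Chars.isdigit c = false := eq_false_of_ne_true h
      rw [List.takeWhile_cons_of_pos (by simp [hb]), List.dropWhile_cons_of_pos (by simp [hb])]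
      simp only [goA, hb, if_false, Bool.false_eq_true, List.all_cons]
      by_cases ha : PySem.Chars.isalpha c = true
      · simp [ha, ih]
      · simp [eq_false_of_ne_true ha]

-- ===== VERDICT (by name: the statement is the Claim_ definition above) =====
theorem check_characters_and_position_spec : Claim_equal_check_characters_and_position := by
  intro s _
  unfold Spec_check_characters_and_position check_characters_and_position check_characters_and_position_alt
  exact goA_eq_split s.toList
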